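-- pv_equiv track=rewrite | github.com/0aad/Video-Compare | process_frames.py | find_frames_to_compare
-- ===== SOURCE A (Python) =====
-- def find_frames_to_compare(original_frame, recorded_frame_range, recorded_frame_index, ratio):
--     frames_to_compare = []
--     range_extent = 3  # 前后3帧范围
--
--     for offset in range(-range_extent, range_extent + 1):
--         compare_index = recorded_frame_index + offset
--         if 0 <= compare_index < len(recorded_frame_range):
--             frames_to_compare.append(recorded_frame_range[compare_index])
--
--     return original_frame, frames_to_compare
-- ===== SOURCE B (Python) =====
-- def find_frames_to_compare(original_frame, recorded_frame_range, recorded_frame_index, ratio):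
--     # One clamped contiguous slice instead of a per-offset bounds-checked loop.
--     start = max(0, recorded_frame_index - 3)
--     end = max(0, recorded_frame_index + 4)
--     return original_frame, recorded_frame_range[start:end]
-- ===== Notes on version B (the rewrite author's own statement) =====
-- stated objective: simpler
-- what changed: Replaces the 7-iteration offset loop with per-index bounds checks and appends by arithmetic on the window bounds (both clamped with max(0, .)) and a single contiguous list slice.
import Mathlib
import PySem

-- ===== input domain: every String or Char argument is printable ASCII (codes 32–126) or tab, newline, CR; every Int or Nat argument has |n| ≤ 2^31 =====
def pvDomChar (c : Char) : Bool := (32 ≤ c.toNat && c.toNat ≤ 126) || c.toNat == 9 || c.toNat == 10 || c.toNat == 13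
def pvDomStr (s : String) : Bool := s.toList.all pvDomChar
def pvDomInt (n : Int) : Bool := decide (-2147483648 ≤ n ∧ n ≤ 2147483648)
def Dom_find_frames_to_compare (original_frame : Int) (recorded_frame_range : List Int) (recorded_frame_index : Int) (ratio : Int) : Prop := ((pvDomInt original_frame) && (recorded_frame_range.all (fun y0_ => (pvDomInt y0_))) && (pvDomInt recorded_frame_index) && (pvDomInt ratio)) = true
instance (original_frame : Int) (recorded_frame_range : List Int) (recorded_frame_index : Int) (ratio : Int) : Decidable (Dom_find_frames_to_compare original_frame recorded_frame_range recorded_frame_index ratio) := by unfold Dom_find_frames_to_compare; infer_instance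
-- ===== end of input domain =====

-- B replaces A's per-offset bounds-checked append loop by arithmetic on the clamped
-- window bounds plus one contiguous slice (objective: simpler).

-- ===== PORT A =====
def find_frames_to_compare (original_frame : Int) (recorded_frame_range : List Int) (recorded_frame_index : Int) (ratio : Int) : Int × List Int :=
  let range_extent : Int := 3
  let frames_to_compare :=
    (PySem.List.pyRange (-range_extent) (range_extent + 1) 1).foldl
      (fun acc offset =>
        let compare_index := recorded_frame_index + offset
        if 0 ≤ compare_index ∧ compare_index < (recorded_frame_range.length : Int) then
          acc ++ [PySem.List.pyGetD recorded_frame_range compare_index 0]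
        else acc) []
  (original_frame, frames_to_compare)

-- ===== PORT B =====
def find_frames_to_compare_alt (original_frame : Int) (recorded_frame_range : List Int) (recorded_frame_index : Int) (ratio : Int) : Int × List Int :=
  let start := max 0 (recorded_frame_index - 3)
  let stop := max 0 (recorded_frame_index + 4)
  (original_frame, PySem.List.slice recorded_frame_range (some start) (some stop))

-- ===== PRECONDITION & SPEC =====
def Spec_find_frames_to_compare (original_frame : Int) (recorded_frame_range : List Int) (recorded_frame_index : Int) (ratio : Int) (out : Int × List Int) : Prop := out = find_frames_to_compare_alt original_frame recorded_frame_range recorded_frame_index ratio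
instance (original_frame : Int) (recorded_frame_range : List Int) (recorded_frame_index : Int) (ratio : Int) (out : Int × List Int) : Decidable (Spec_find_frames_to_compare original_frame recorded_frame_range recorded_frame_index ratio out) := by unfold Spec_find_frames_to_compare; infer_instance

-- ===== CLAIM (what is proved, stated in full; the proofs are below) =====
def Claim_equal_find_frames_to_compare : Prop := ∀ (original_frame : Int) (recorded_frame_range : List Int) (recorded_frame_index : Int) (ratio : Int), Dom_find_frames_to_compare original_frame recorded_frame_range recorded_frame_index ratio → Spec_find_frames_to_compare original_frame recorded_frame_range recorded_frame_index ratio (find_frames_to_compare original_frame recorded_frame_range recorded_frame_index ratio)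

-- ===== LEMMAS AND PROOFS =====

-- ===== VERDICT (by name: the statement is the Claim_ definition above) =====
-- the window loop, over any integer range, equals the clamped slice
lemma loop_slice (xs : List Int) (a b : Int) (acc : List Int) :
    (PySem.List.pyRange a b 1).foldl
      (fun acc i =>
        if 0 ≤ i ∧ i < (xs.length : Int) then acc ++ [PySem.List.pyGetD xs i 0] else acc) acc
    = acc ++ PySem.List.slice xs (some (max 0 a)) (some (max 0 b)) := by
  by_cases hab : b ≤ a
  · rw [PySem.List.pyRange_one_eq_nil hab, List.foldl_nil,
        PySem.List.slice_toNat xs (le_max_left 0 a) (le_max_left 0 b)]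
    have : (max 0 b).toNat ≤ (max 0 a).toNat := by omega
    simp [Nat.sub_eq_zero_of_le this]
  · have hab' : a < b := by omega
    rw [PySem.List.pyRange_one_cons hab', List.foldl_cons]
    have IH := loop_slice xs (a + 1) b
    by_cases hp : 0 ≤ a ∧ a < (xs.length : Int)
    · rw [if_pos hp, IH]
      rw [PySem.List.slice_toNat xs (le_max_left 0 a) (le_max_left 0 b),
          PySem.List.slice_toNat xs (le_max_left 0 (a+1)) (le_max_left 0 b)]
      have h1 : (max 0 a).toNat = a.toNat := by omega
      have h2 : (max 0 (a+1)).toNat = a.toNat + 1 := by omega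
      have hlt : a.toNat < xs.length := by omega
      have h3 : (max 0 b).toNat - a.toNat = ((max 0 b).toNat - (a.toNat + 1)) + 1 := by omega
      rw [h1, h2, h3, List.drop_eq_getElem_cons hlt, List.take_succ_cons,
          ]
      simp [PySem.List.pyGetD_eq_getElem xs 0 hp.1 hp.2]
    · rw [if_neg hp, IH]
      have heq : PySem.List.slice xs (some (max 0 (a+1))) (some (max 0 b))
          = PySem.List.slice xs (some (max 0 a)) (some (max 0 b)) := by
        by_cases ha : a < 0
        · rw [show max 0 (a+1) = max 0 a by omega]
        · rw [PySem.List.slice_toNat xs (le_max_left 0 a) (le_max_left 0 b),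
              PySem.List.slice_toNat xs (le_max_left 0 (a+1)) (le_max_left 0 b),
              List.drop_eq_nil_of_le (by omega), List.drop_eq_nil_of_le (by omega)]
          simp
      rw [heq]
termination_by (b - a).toNat
decreasing_by omega

-- a shifted range(a, b) is the range of shifted bounds
lemma pyRange_shift (c a b : Int) :
    (PySem.List.pyRange a b 1).map (fun k => c + k) = PySem.List.pyRange (c + a) (c + b) 1 := by
  simp only [PySem.List.pyRange_one, List.map_map]
  rw [show c + b - (c + a) = b - a by ring]
  exact List.map_congr_left (fun k _ => by simp; ring)

theorem find_frames_to_compare_spec : Claim_equal_find_frames_to_compare := by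
  intro original_frame recorded_frame_range recorded_frame_index ratio _
  unfold Spec_find_frames_to_compare find_frames_to_compare find_frames_to_compare_alt
  simp only []
  have hshift := pyRange_shift recorded_frame_index (-3) 4
  rw [show recorded_frame_index + -3 = recorded_frame_index - 3 by ring,
      show recorded_frame_index + 4 = recorded_frame_index + 4 by ring] at hshift
  have := loop_slice recorded_frame_range (recorded_frame_index - 3) (recorded_frame_index + 4) []
  rw [← hshift, List.foldl_map] at this
  simpa using this
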